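-- pv_equiv track=rewrite | github.com/stingpie/wacky-cyberpunk | version 0/helper_functions.py | meets_requirements
-- ===== SOURCE A (Python) =====
-- def meets_requirements(player_flags, required_flags, prevent_flags):
--     for val in required_flags:
--         if not val in player_flags:
--             return False
--     for val in prevent_flags:
--         if val in player_flags:
--             return False
--     return True
-- ===== SOURCE B (Python) =====
-- def meets_requirements(player_flags, required_flags, prevent_flags):
--     remaining = set(required_flags)
--     banned = set(prevent_flags)
--     for flag in player_flags:
--         if flag in banned:
--             return False
--         remaining.discard(flag)
--     return not remaining
-- ===== Notes on version B (the rewrite author's own statement) =====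
-- stated objective: alternative
-- what changed: B iterates once over player_flags (A never iterates them), discarding each seen flag from a remaining-required set and failing fast on a banned flag, then succeeds iff the remaining set is empty; A instead loops over required_flags and prevent_flags doing list-membership scans of player_flags.
import Mathlib
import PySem

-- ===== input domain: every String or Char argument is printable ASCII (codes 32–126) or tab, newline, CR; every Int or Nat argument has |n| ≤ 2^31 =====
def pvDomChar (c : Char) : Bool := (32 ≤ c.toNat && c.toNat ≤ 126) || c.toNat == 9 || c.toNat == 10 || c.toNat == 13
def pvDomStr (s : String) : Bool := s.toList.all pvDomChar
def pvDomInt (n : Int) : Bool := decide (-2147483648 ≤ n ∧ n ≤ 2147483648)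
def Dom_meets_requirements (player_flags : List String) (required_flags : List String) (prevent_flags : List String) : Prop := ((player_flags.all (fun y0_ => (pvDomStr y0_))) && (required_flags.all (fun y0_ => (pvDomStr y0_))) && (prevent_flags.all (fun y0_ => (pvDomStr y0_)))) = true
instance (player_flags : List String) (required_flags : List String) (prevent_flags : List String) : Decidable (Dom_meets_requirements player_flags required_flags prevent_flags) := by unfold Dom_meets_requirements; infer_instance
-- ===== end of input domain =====

-- B replaces A's membership loops over required/prevent with a single pass over player_flags maintaining a remaining-required set and a banned set (alternative decomposition).


-- ===== PORT A =====
-- 'for val in prevent_flags: if val in player_flags: return False; return True'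
def pvPreventLoop (player_flags : List String) : List String → Bool
  | [] => true
  | val :: rest => if player_flags.contains val then false else pvPreventLoop player_flags rest

-- 'for val in required_flags: if not val in player_flags: return False', then the prevent loop
def pvRequiredLoop (player_flags : List String) (prevent_flags : List String) : List String → Bool
  | [] => pvPreventLoop player_flags prevent_flags
  | val :: rest => if !(player_flags.contains val) then false else pvRequiredLoop player_flags prevent_flags rest

def meets_requirements (player_flags : List String) (required_flags : List String) (prevent_flags : List String) : Bool :=
  pvRequiredLoop player_flags prevent_flags required_flags

-- ===== PORT B =====
-- 'for flag in player_flags: if flag in banned: return False; remaining.discard(flag)', then 'return not remaining'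
def pvPlayerScan (banned : PySem.Set String) : PySem.Set String → List String → Bool
  | remaining, [] => remaining.isEmpty
  | remaining, flag :: rest =>
      if PySem.Set.contains banned flag then false
      else pvPlayerScan banned (PySem.Set.discard remaining flag) rest

def meets_requirements_alt (player_flags : List String) (required_flags : List String) (prevent_flags : List String) : Bool :=
  pvPlayerScan (PySem.Set.ofList prevent_flags) (PySem.Set.ofList required_flags) player_flags

-- ===== PRECONDITION & SPEC =====
def Spec_meets_requirements (player_flags : List String) (required_flags : List String) (prevent_flags : List String) (out : Bool) : Prop := out = meets_requirements_alt player_flags required_flags prevent_flags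
instance (player_flags : List String) (required_flags : List String) (prevent_flags : List String) (out : Bool) : Decidable (Spec_meets_requirements player_flags required_flags prevent_flags out) := by unfold Spec_meets_requirements; infer_instance

-- ===== CLAIM =====
def Claim_equal_meets_requirements : Prop := ∀ (player_flags : List String) (required_flags : List String) (prevent_flags : List String), Dom_meets_requirements player_flags required_flags prevent_flags → Spec_meets_requirements player_flags required_flags prevent_flags (meets_requirements player_flags required_flags prevent_flags)

-- ===== LEMMAS AND PROOFS =====

theorem pvPreventLoop_eq (p : List String) (xs : List String) :
    pvPreventLoop p xs = xs.all (fun v => !(p.contains v)) := by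
  induction xs with
  | nil => rfl
  | cons v rest ih => by_cases h : p.contains v <;> simp [pvPreventLoop, ih]

theorem pvRequiredLoop_eq (p q : List String) (xs : List String) :
    pvRequiredLoop p q xs = (xs.all (fun v => p.contains v) && pvPreventLoop p q) := by
  induction xs with
  | nil => rfl
  | cons v rest ih => by_cases h : p.contains v <;> simp [pvRequiredLoop, ih, Bool.and_assoc]

theorem pvPlayerScan_iff (banned : PySem.Set String) (pl : List String) (remaining : PySem.Set String) :
    pvPlayerScan banned remaining pl = true ↔
      (∀ f ∈ pl, f ∉ banned) ∧ (∀ r ∈ remaining, r ∈ pl) := by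
  induction pl generalizing remaining with
  | nil =>
      simp [pvPlayerScan, List.isEmpty_iff, List.eq_nil_iff_forall_not_mem]
  | cons f rest ih =>
      rw [pvPlayerScan]
      by_cases h : f ∈ banned
      · simp only [PySem.Set.contains_eq_listContains, List.contains_eq_mem, h, decide_true,
          if_true, List.mem_cons]
        exact iff_of_false (by simp) (fun hh => hh.1 f (Or.inl rfl) h)
      · simp only [PySem.Set.contains_eq_listContains, List.contains_eq_mem, h, decide_false,
          Bool.false_eq_true, if_false, ih, PySem.Set.mem_discard, List.mem_cons]
        constructor
        · rintro ⟨h1, h2⟩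
          refine ⟨?_, ?_⟩
          · rintro g (rfl | hg)
            · exact h
            · exact h1 g hg
          · intro r hr
            by_cases hrf : r = f
            · exact Or.inl hrf
            · exact Or.inr (h2 r ⟨hr, hrf⟩)
        · rintro ⟨h1, h2⟩
          refine ⟨fun g hg => h1 g (Or.inr hg), ?_⟩
          intro r ⟨hr, hrf⟩
          rcases h2 r hr with rfl | hmem
          · exact absurd rfl hrf
          · exact hmem

-- ===== VERDICT =====
theorem meets_requirements_spec : Claim_equal_meets_requirements := by
  intro player required prevent _
  unfold Spec_meets_requirements
  rw [meets_requirements, meets_requirements_alt, pvRequiredLoop_eq, pvPreventLoop_eq]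
  apply Bool.eq_iff_iff.mpr
  rw [pvPlayerScan_iff]
  simp only [Bool.and_eq_true, List.all_eq_true, PySem.Set.mem_ofList,
    List.contains_eq_mem, Bool.not_eq_eq_eq_not, Bool.not_true,
    decide_eq_true_eq, decide_eq_false_iff_not]
  constructor
  · rintro ⟨hreq, hprev⟩
    exact ⟨fun f hf hfp => hprev f hfp hf, fun r hr => hreq r hr⟩
  · rintro ⟨hplay, hrem⟩
    exact ⟨fun r hr => hrem r hr, fun v hv hvp => hplay v hvp hv⟩
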